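-- pv_equiv track=rewrite | github.com/PHIHSH/1-Squatting-Domain-Identification | squatting_API_fast_screen.py | mobile_phishing_via_padding
-- ===== SOURCE A (Python) =====
-- HYPHEN_DISTANCE_THRESHOLD = 4
--
-- def mobile_phishing_via_padding(domain, original_domain):
--     def count_continous_hypens(domain):
--         count = 0
--         for i in domain:
--             if i == u'-':
--                 count += 1
--                 if count > HYPHEN_DISTANCE_THRESHOLD:
--                     return True
--             else:
--                 count = 0
--         if count > HYPHEN_DISTANCE_THRESHOLD:
--             return True
--         return False
--
--     if original_domain in domain and count_continous_hypens(domain):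
--         return True
--     return False
-- ===== SOURCE B (Python) =====
-- HYPHEN_DISTANCE_THRESHOLD = 4
--
-- def mobile_phishing_via_padding(domain, original_domain):
--     return original_domain in domain and ('-' * (HYPHEN_DISTANCE_THRESHOLD + 1)) in domain
-- ===== Notes on version B (the rewrite author's own statement) =====
-- stated objective: faster
-- what changed: The hand-rolled consecutive-hyphen counter loop is replaced by a single built-in substring test for '-----' (a run longer than threshold 4 exists iff five consecutive hyphens occur), so B keeps no counter state and does no per-character Python iteration, delegating both checks to the C-level substring search.
import Mathlib
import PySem

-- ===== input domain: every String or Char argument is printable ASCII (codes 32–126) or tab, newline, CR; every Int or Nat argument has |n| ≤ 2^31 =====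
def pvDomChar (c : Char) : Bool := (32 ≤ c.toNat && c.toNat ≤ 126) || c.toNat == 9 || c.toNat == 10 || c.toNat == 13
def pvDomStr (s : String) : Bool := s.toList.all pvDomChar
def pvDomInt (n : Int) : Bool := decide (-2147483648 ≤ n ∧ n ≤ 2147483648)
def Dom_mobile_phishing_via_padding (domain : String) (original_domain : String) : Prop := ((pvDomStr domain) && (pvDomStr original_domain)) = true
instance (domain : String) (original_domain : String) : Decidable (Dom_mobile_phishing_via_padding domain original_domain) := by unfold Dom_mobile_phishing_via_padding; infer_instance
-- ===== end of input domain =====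

-- B replaces A's hand-rolled consecutive-hyphen counter loop with a single built-in
-- substring test for "-----" (simpler: a run longer than 4 exists iff "-----" occurs).


-- ===== PORT A =====
def HYPHEN_DISTANCE_THRESHOLD : Nat := 4

-- the 'for i in domain' loop of count_continous_hypens, carrying the counter
def pvCountLoop : List Char → Nat → Bool
  | [], count => decide (count > HYPHEN_DISTANCE_THRESHOLD)
  | c :: rest, count =>
      if c = '-' then
        if count + 1 > HYPHEN_DISTANCE_THRESHOLD then true
        else pvCountLoop rest (count + 1)
      else pvCountLoop rest 0

def count_continous_hypens (domain : String) : Bool := pvCountLoop domain.toList 0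

def mobile_phishing_via_padding (domain : String) (original_domain : String) : Bool :=
  if PySem.Str.isIn original_domain domain && count_continous_hypens domain then true
  else false

-- ===== PORT B =====
def mobile_phishing_via_padding_alt (domain : String) (original_domain : String) : Bool :=
  PySem.Str.isIn original_domain domain && PySem.Str.isIn "-----" domain

-- ===== PRECONDITION & SPEC =====
def Spec_mobile_phishing_via_padding (domain : String) (original_domain : String) (out : Bool) : Prop := out = mobile_phishing_via_padding_alt domain original_domain
instance (domain : String) (original_domain : String) (out : Bool) : Decidable (Spec_mobile_phishing_via_padding domain original_domain out) := by unfold Spec_mobile_phishing_via_padding; infer_instance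

-- ===== CLAIM (what is proved, stated in full; the proofs are below) =====
def Claim_equal_mobile_phishing_via_padding : Prop := ∀ (domain : String) (original_domain : String), Dom_mobile_phishing_via_padding domain original_domain → Spec_mobile_phishing_via_padding domain original_domain (mobile_phishing_via_padding domain original_domain)

-- ===== LEMMAS AND PROOFS =====

-- invariant of the counter loop: with counter c ≤ 4, it returns true iff the
-- remaining input starts with 5-c hyphens, or contains 5 consecutive hyphens anywhere
theorem pvCountLoop_iff (l : List Char) (c : Nat) (hc : c ≤ 4) :
    pvCountLoop l c = true ↔
      (List.replicate (5 - c) '-' <+: l ∨ List.replicate 5 '-' <:+: l) := by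
  induction l generalizing c with
  | nil =>
      simp only [pvCountLoop, HYPHEN_DISTANCE_THRESHOLD, decide_eq_true_eq,
        List.prefix_nil, List.infix_nil, List.replicate_eq_nil_iff]
      omega
  | cons x rest ih =>
      by_cases hx : x = '-'
      · subst hx
        by_cases h4 : c = 4
        · subst h4
          rw [show pvCountLoop ('-' :: rest) 4 = true by
            simp [pvCountLoop, HYPHEN_DISTANCE_THRESHOLD]]
          simp only [true_iff]
          left
          show List.replicate 1 '-' <+: '-' :: rest
          exact ⟨rest, by simp [List.replicate]⟩
        · have hc' : c + 1 ≤ 4 := by omega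
          have hrepl : List.replicate (5 - c) '-' = '-' :: List.replicate (4 - c) '-' := by
            have : 5 - c = (4 - c) + 1 := by omega
            rw [this, List.replicate_succ]
          rw [show pvCountLoop ('-' :: rest) c = pvCountLoop rest (c + 1) by
            simp [pvCountLoop, HYPHEN_DISTANCE_THRESHOLD]; omega]
          rw [ih (c + 1) hc']
          have h54 : 5 - (c + 1) = 4 - c := by omega
          rw [h54]
          constructor
          · rintro (h | h)
            · left; rw [hrepl]; exact List.cons_prefix_cons.mpr ⟨rfl, h⟩
            · right; exact List.infix_cons h
          · rintro (h | h)
            · rw [hrepl] at h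
              left; exact (List.cons_prefix_cons.mp h).2
            · rcases (List.infix_cons_iff.mp h) with h' | h'
              · left
                have h5 : List.replicate 5 '-' = '-' :: List.replicate 4 '-' := by
                  rw [show (5:Nat) = 4 + 1 from rfl, List.replicate_succ]
                rw [h5] at h'
                have h4r : List.replicate 4 '-' <+: rest := (List.cons_prefix_cons.mp h').2
                -- replicate (4-c) is a prefix of replicate 4
                have : List.replicate (4 - c) '-' <+: List.replicate 4 '-' :=
                  ⟨List.replicate c '-', by
                    rw [← List.replicate_add]; congr 1; omega⟩
                exact this.trans h4r
              · right; exact h'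
      · rw [show pvCountLoop (x :: rest) c = pvCountLoop rest 0 by
          simp [pvCountLoop, hx]]
        rw [ih 0 (by omega)]
        constructor
        · rintro (h | h)
          · right; exact List.infix_cons h.isInfix
          · right; exact List.infix_cons h
        · rintro (h | h)
          · exfalso
            have h5 : 5 - c = (4 - c) + 1 := by omega
            rw [h5, List.replicate_succ] at h
            have := (List.cons_prefix_cons.mp h).1
            exact hx this.symm
          · rcases List.infix_cons_iff.mp h with h' | h'
            · exfalso
              rw [show (5:Nat) = 4 + 1 from rfl, List.replicate_succ] at h'
              exact hx (List.cons_prefix_cons.mp h').1.symm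
            · right; exact h'

theorem count_eq_isIn (domain : String) :
    count_continous_hypens domain = PySem.Str.isIn "-----" domain := by
  unfold count_continous_hypens
  by_cases h : PySem.Str.isIn "-----" domain = true
  · rw [h]
    rw [pvCountLoop_iff _ 0 (by omega)]
    right
    have := (PySem.Str.isIn_iff_infix _ _).mp h
    simpa using this
  · rw [Bool.not_eq_true] at h
    rw [h, Bool.eq_false_iff, Ne, pvCountLoop_iff _ 0 (by omega)]
    have e : "-----".toList = List.replicate 5 '-' := by decide
    have hni : ¬ (List.replicate 5 '-' <:+: domain.toList) := by
      intro hc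
      rw [(PySem.Str.isIn_iff_infix "-----" domain).mpr (by rw [e]; exact hc)] at h
      cases h
    rintro (hp | hi)
    · exact hni (by simpa using hp.isInfix)
    · exact hni hi

-- ===== VERDICT (by name: the statement is the Claim_ definition above) =====
theorem mobile_phishing_via_padding_spec : Claim_equal_mobile_phishing_via_padding := by
  intro domain original_domain _
  unfold Spec_mobile_phishing_via_padding mobile_phishing_via_padding mobile_phishing_via_padding_alt
  rw [count_eq_isIn]
  cases PySem.Str.isIn original_domain domain <;> cases PySem.Str.isIn "-----" domain <;> simp
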